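-- pv_equiv track=rewrite | github.com/Kawser-nerd/CLCDSA | Source Codes/AtCoder/agc021/D/2140631.py | solve
-- ===== SOURCE A (Python) =====
-- def solve(s, k):
--     n = len(s)
--     if k >= n // 2:
--         return n
--     dpp = [[1] * (k + 1), [0] * (k + 1)]
--     for r in range(1, n):
--         dpc = [[0] * (k + 1) for _ in range(r + 2)]
--         dpc[r] = [1] * (k + 1)
--         for l in range(r - 1, -1, -1):
--             dpl, dpl1 = dpc[l], dpp[l + 1]
--             if s[l] == s[r]:
--                 dpc[l] = [c + 2 for c in dpl1]
--             else:
--                 dppl, dpcl1 = dpp[l], dpc[l + 1]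
--                 dpl[0] = max(dppl[0], dpcl1[0])
--                 for p in range(1, k + 1):
--                     dpl[p] = max(dppl[p], dpcl1[p], dpl1[p - 1] + 2)
--         dpp = dpc
--
--     return dpp[0][k]
-- ===== SOURCE B (Python) =====
-- def solve(s, k):
--     n = len(s)
--     if k >= n // 2:
--         return n
--     memo = {}
--
--     def f(l, r, p):
--         if l > r:
--             return 0
--         if l == r:
--             return 1
--         key = (l, r, p)
--         if key in memo:
--             return memo[key]
--         if s[l] == s[r]:
--             v = f(l + 1, r - 1, p) + 2
--         else:
--             v = max(f(l, r - 1, p), f(l + 1, r, p))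
--             if p:
--                 v = max(v, f(l + 1, r - 1, p - 1) + 2)
--         memo[key] = v
--         return v
--
--     return f(0, n - 1, k)
-- ===== Notes on version B (the rewrite author's own statement) =====
-- stated objective: alternative
-- what changed: Replaces A's bottom-up sweep that materialises every DP state column by column (outer loop over the right endpoint, inner descending loop mutating rolling rows) with top-down memoized recursion f(l,r,p) that computes only the states actually reachable from (0,n-1,k) on demand.
import Mathlib
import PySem

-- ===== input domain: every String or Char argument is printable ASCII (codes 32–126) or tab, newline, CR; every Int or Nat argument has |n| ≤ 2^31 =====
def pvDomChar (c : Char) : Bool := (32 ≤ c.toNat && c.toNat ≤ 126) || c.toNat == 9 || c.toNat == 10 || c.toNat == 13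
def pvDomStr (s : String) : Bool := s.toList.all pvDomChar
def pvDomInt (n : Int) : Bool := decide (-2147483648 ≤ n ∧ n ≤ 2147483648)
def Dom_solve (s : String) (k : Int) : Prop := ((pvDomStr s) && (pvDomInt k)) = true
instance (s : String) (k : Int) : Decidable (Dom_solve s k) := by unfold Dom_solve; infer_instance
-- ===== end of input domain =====

-- B replaces A's bottom-up column sweep (which materialises every DP state) with
-- top-down memoized recursion f(l, r, p) computing only the states reachable
-- from (0, n-1, k) on demand.  List indexing (s[l], dpp[l][p], …) is ported as
-- getD; under Pre_solve every such index is in range, so getD is exact there.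

-- ===== PORT A =====
-- body of the inner `for l in range(r-1, -1, -1)` loop
def solveAstep (cs : List Char) (kk : Nat) (dpp : List (List Int)) (r : Nat)
    (dpc : List (List Int)) (l : Nat) : List (List Int) :=
  let dpl := dpc.getD l []
  let dpl1 := dpp.getD (l + 1) []
  if cs.getD l ' ' = cs.getD r ' ' then
    dpc.set l (dpl1.map (fun c => c + 2))
  else
    let dppl := dpp.getD l []
    let dpcl1 := dpc.getD (l + 1) []
    let dpl := dpl.set 0 (max (dppl.getD 0 0) (dpcl1.getD 0 0))
    let dpl := (List.range' 1 kk).foldl (fun dpl p =>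
      dpl.set p (max (max (dppl.getD p 0) (dpcl1.getD p 0)) (dpl1.getD (p - 1) 0 + 2))) dpl
    dpc.set l dpl

-- body of the outer `for r in range(1, n)` loop
def solveAcol (cs : List Char) (kk : Nat) (dpp : List (List Int)) (r : Nat) : List (List Int) :=
  let dpc := (List.replicate (r + 2) (List.replicate (kk + 1) 0)).set r (List.replicate (kk + 1) 1)
  ((List.range r).reverse).foldl (solveAstep cs kk dpp r) dpc
  -- range(r-1, -1, -1) ported as (List.range r).reverse = [r-1, …, 0]: exact

def solve (s : String) (k : Int) : Int :=
  let cs := s.toList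
  let n : Int := cs.length
  if PySem.Int.floordiv n 2 ≤ k then n
  else
    let kk : Nat := k.toNat        -- 0 ≤ k under Pre_solve, so kk = k exactly
    let nn : Nat := cs.length
    let dpp : List (List Int) := [List.replicate (kk + 1) 1, List.replicate (kk + 1) 0]
    let dpp := (List.range' 1 (nn - 1)).foldl (solveAcol cs kk) dpp
    (dpp.getD 0 []).getD kk 0

-- ===== PORT B =====
-- the memoized recursion f(l, r, p) of Source B; the memo dict is threaded through
-- (result, updated memo).  `if p ≠ 0` ports Python's truthiness test `if p:`.
def solveBf (cs : List Char) (l r : Nat) (p : Int)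
    (memo : PySem.Dict (Nat × Nat × Int) Int) : Int × PySem.Dict (Nat × Nat × Int) Int :=
  if _h1 : r < l then (0, memo)
  else if _h2 : l = r then (1, memo)
  else
    match memo.get? (l, r, p) with
    | some v => (v, memo)
    | none =>
      if cs.getD l ' ' = cs.getD r ' ' then
        let t := solveBf cs (l + 1) (r - 1) p memo
        let v := t.1 + 2
        (v, t.2.insert (l, r, p) v)
      else
        let t1 := solveBf cs l (r - 1) p memo
        let t2 := solveBf cs (l + 1) r p t1.2
        let v := max t1.1 t2.1
        if p ≠ 0 then
          let t3 := solveBf cs (l + 1) (r - 1) (p - 1) t2.2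
          let v := max v (t3.1 + 2)
          (v, t3.2.insert (l, r, p) v)
        else (v, t2.2.insert (l, r, p) v)
termination_by r - l
decreasing_by all_goals omega

def solve_alt (s : String) (k : Int) : Int :=
  let cs := s.toList
  let n : Int := cs.length
  if PySem.Int.floordiv n 2 ≤ k then n
  else
    let nn : Nat := cs.length
    (solveBf cs 0 (nn - 1) k PySem.Dict.empty).1

-- ===== PRECONDITION & SPEC =====
-- Pre_ excludes k < 0 (with k < len(s)//2): there A indexes its empty budget
-- rows ([1]*(k+1) = []) and raises IndexError, returning no value.
def Pre_solve (_s : String) (k : Int) : Prop := 0 ≤ k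
instance (s : String) (k : Int) : Decidable (Pre_solve s k) := by unfold Pre_solve; infer_instance
def pvWitness_solve : String × Int := ("abcba", 1)

def Spec_solve (s : String) (k : Int) (out : Int) : Prop := out = solve_alt s k
instance (s : String) (k : Int) (out : Int) : Decidable (Spec_solve s k out) := by unfold Spec_solve; infer_instance

-- ===== CLAIM (what is proved, stated in full; the proofs are below) =====
def Claim_equal_solve : Prop := ∀ (s : String) (k : Int), Dom_solve s k → Pre_solve s k → Spec_solve s k (solve s k)

-- ===== LEMMAS AND PROOFS =====

-- the common recurrence: best palindromic subsequence of s[l..r] with p changes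
def g (cs : List Char) (l r p : Nat) : Int :=
  if _h : r ≤ l then (if r < l then 0 else 1)
  else if cs.getD l ' ' = cs.getD r ' ' then g cs (l + 1) (r - 1) p + 2
  else
    let m := max (g cs l (r - 1) p) (g cs (l + 1) r p)
    if p = 0 then m else max m (g cs (l + 1) (r - 1) (p - 1) + 2)
termination_by r - l
decreasing_by all_goals omega

def RowEq (row : List Int) (K : Nat) (f : Nat → Int) : Prop :=
  row.length = K ∧ ∀ p, p < K → row.getD p 0 = f p

lemma getD_set_self {α : Type} (xs : List α) (i : Nat) (v d : α) (h : i < xs.length) :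
    (xs.set i v).getD i d = v := by simp [List.getD, h]

lemma getD_set_ne {α : Type} (xs : List α) (i j : Nat) (v d : α) (h : i ≠ j) :
    (xs.set i v).getD j d = xs.getD j d := by simp [List.getD, List.getElem?_set_ne h]

lemma getD_replicate {α : Type} (n i : Nat) (c d : α) (h : i < n) :
    (List.replicate n c).getD i d = c := by simp [List.getD, h]

lemma rowEq_map_add2 {row : List Int} {K : Nat} {f : Nat → Int} (h : RowEq row K f) :
    RowEq (row.map (fun c => c + 2)) K (fun p => f p + 2) := by
  obtain ⟨hl, hv⟩ := h
  refine ⟨by simp [hl], fun p hp => ?_⟩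
  have hp' : p < row.length := by omega
  simp only [List.getD, List.getElem?_eq_getElem, List.getElem_map, hp',
    List.length_map, Option.getD_some]
  have := hv p hp
  simp only [List.getD, List.getElem?_eq_getElem, hp', Option.getD_some] at this
  rw [this]

-- writing F p at positions a, …, a+len-1 (F does not read the row)
lemma foldl_set_range' (F : Nat → Int) (a len : Nat) :
    ∀ (row : List Int),
      ((List.range' a len).foldl (fun row p => row.set p (F p)) row).length = row.length ∧
      ∀ q, ((List.range' a len).foldl (fun row p => row.set p (F p)) row).getD q 0 =
        if a ≤ q ∧ q < a + len ∧ q < row.length then F q else row.getD q 0 := by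
  induction len generalizing a with
  | zero => intro row; simp; intro q h1 h2; omega
  | succ m ih =>
    intro row
    rw [List.range'_succ]
    simp only [List.foldl_cons]
    obtain ⟨ihl, ihv⟩ := ih (a + 1) (row.set a (F a))
    refine ⟨by simp [ihl], fun q => ?_⟩
    rw [ihv q]
    simp only [List.length_set]
    by_cases hq : a = q
    · subst hq
      by_cases hlen : a < row.length
      · rw [getD_set_self _ _ _ _ hlen]
        split_ifs <;> first | rfl | omega
      · rw [List.set_eq_of_length_le (by omega)]
        split_ifs <;> first | rfl | omega
    · rw [getD_set_ne _ _ _ _ _ hq]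
      split_ifs <;> first | rfl | omega

-- g on the diagonal and below
lemma g_diag (cs : List Char) (l p : Nat) : g cs l l p = 1 := by rw [g]; simp
lemma g_empty (cs : List Char) {l r : Nat} (h : r < l) (p : Nat) : g cs l r p = 0 := by
  rw [g]; simp [h, Nat.le_of_lt h]

-- unfolding of g on a non-degenerate interval
lemma g_step (cs : List Char) {l r : Nat} (h : l < r) (p : Nat) :
    g cs l r p =
      if cs.getD l ' ' = cs.getD r ' ' then g cs (l + 1) (r - 1) p + 2
      else
        if p = 0 then max (g cs l (r - 1) p) (g cs (l + 1) r p)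
        else max (max (g cs l (r - 1) p) (g cs (l + 1) r p)) (g cs (l + 1) (r - 1) (p - 1) + 2) := by
  rw [g]
  have h' : ¬ r ≤ l := by omega
  simp only [h', dite_false]

-- ===== A-side invariants =====

-- invariant of the previous column r-1 (rows 0 … r are available)
def AprevInv (cs : List Char) (kk r : Nat) (dpp : List (List Int)) : Prop :=
  ∀ l, l ≤ r + 1 → RowEq (dpp.getD l []) (kk + 1) (g cs l r)

-- invariant of the current column during the descending l loop
def AcurInv (cs : List Char) (kk r j : Nat) (dpc : List (List Int)) : Prop :=
  dpc.length = r + 2 ∧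
  (∀ l, l < j → dpc.getD l [] = List.replicate (kk + 1) 0) ∧
  (∀ l, j ≤ l → l ≤ r + 1 → RowEq (dpc.getD l []) (kk + 1) (g cs l r))

lemma stepA_inv (cs : List Char) (kk r l : Nat) (dpp dpc : List (List Int))
    (hdpp : AprevInv cs kk (r - 1) dpp) (hr : 1 ≤ r) (hl : l < r)
    (hdpc : AcurInv cs kk r (l + 1) dpc) :
    AcurInv cs kk r l (solveAstep cs kk dpp r dpc l) := by
  obtain ⟨hlen, hzero, hrows⟩ := hdpc
  have hrow_l : dpc.getD l [] = List.replicate (kk + 1) 0 := hzero l (by omega)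
  have hdpl1 : RowEq (dpp.getD (l + 1) []) (kk + 1) (g cs (l + 1) (r - 1)) := hdpp (l + 1) (by omega)
  have hdppl : RowEq (dpp.getD l []) (kk + 1) (g cs l (r - 1)) := hdpp l (by omega)
  have hdpcl1 : RowEq (dpc.getD (l + 1) []) (kk + 1) (g cs (l + 1) r) := hrows (l + 1) (by omega) (by omega)
  simp only [solveAstep]
  by_cases hc : cs.getD l ' ' = cs.getD r ' '
  · simp only [if_pos hc]
    refine ⟨by simp [hlen], fun l' hl' => ?_, fun l' h1 h2 => ?_⟩
    · rw [getD_set_ne _ _ _ _ _ (by omega)]; exact hzero l' (by omega)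
    · by_cases he : l' = l
      · subst he
        rw [getD_set_self _ _ _ _ (by omega)]
        have hm := rowEq_map_add2 hdpl1
        exact ⟨hm.1, fun p hp => by rw [hm.2 p hp, g_step cs hl p, if_pos hc]⟩
      · rw [getD_set_ne _ _ _ _ _ (fun he' => he he'.symm)]
        exact hrows l' (by omega) h2
  · simp only [if_neg hc]
    rw [hrow_l]
    have hfold := foldl_set_range'
      (fun p => max (max ((dpp.getD l []).getD p 0) ((dpc.getD (l + 1) []).getD p 0))
        ((dpp.getD (l + 1) []).getD (p - 1) 0 + 2)) 1 kk
      ((List.replicate (kk + 1) 0).set 0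
        (max ((dpp.getD l []).getD 0 0) ((dpc.getD (l + 1) []).getD 0 0)))
    have hrowlen : ((List.replicate (kk + 1) 0).set 0
        (max ((dpp.getD l []).getD 0 0) ((dpc.getD (l + 1) []).getD 0 0))).length = kk + 1 := by simp
    have hnewrow : RowEq ((List.range' 1 kk).foldl
        (fun dpl p => dpl.set p (max (max ((dpp.getD l []).getD p 0) ((dpc.getD (l + 1) []).getD p 0))
          ((dpp.getD (l + 1) []).getD (p - 1) 0 + 2)))
        ((List.replicate (kk + 1) 0).set 0
          (max ((dpp.getD l []).getD 0 0) ((dpc.getD (l + 1) []).getD 0 0))))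
        (kk + 1) (g cs l r) := by
      refine ⟨by rw [hfold.1, hrowlen], fun p hp => ?_⟩
      rw [hfold.2 p]
      by_cases hp0 : p = 0
      · subst hp0
        rw [if_neg (by omega), getD_set_self _ _ _ _ (by simp)]
        rw [hdppl.2 0 (by omega), hdpcl1.2 0 (by omega), g_step cs hl 0, if_neg hc, if_pos rfl]
      · rw [if_pos (by omega)]
        rw [hdppl.2 p hp, hdpcl1.2 p hp, hdpl1.2 (p - 1) (by omega),
          g_step cs hl p, if_neg hc, if_neg hp0]
    refine ⟨by simp [hlen], fun l' hl' => ?_, fun l' h1 h2 => ?_⟩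
    · rw [getD_set_ne _ _ _ _ _ (by omega)]; exact hzero l' (by omega)
    · by_cases he : l' = l
      · subst he
        rw [getD_set_self _ _ _ _ (by omega)]
        exact hnewrow
      · rw [getD_set_ne _ _ _ _ _ (fun he' => he he'.symm)]
        exact hrows l' (by omega) h2

lemma foldA_inv (cs : List Char) (kk r : Nat) (dpp : List (List Int))
    (hdpp : AprevInv cs kk (r - 1) dpp) (hr : 1 ≤ r) :
    ∀ j, j ≤ r → ∀ dpc, AcurInv cs kk r j dpc →
      AcurInv cs kk r 0 (((List.range j).reverse).foldl (solveAstep cs kk dpp r) dpc) := by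
  intro j
  induction j with
  | zero => intro _ dpc h; simpa using h
  | succ m ih =>
    intro hm dpc h
    rw [List.range_succ, List.reverse_append]
    simp only [List.reverse_cons, List.reverse_nil, List.nil_append]
    exact ih (by omega) _ (stepA_inv cs kk r m dpp dpc hdpp hr (by omega) h)

lemma colA_inv (cs : List Char) (kk r : Nat) (dpp : List (List Int))
    (hdpp : AprevInv cs kk (r - 1) dpp) (hr : 1 ≤ r) :
    AprevInv cs kk r (solveAcol cs kk dpp r) := by
  have hinit : AcurInv cs kk r r
      ((List.replicate (r + 2) (List.replicate (kk + 1) 0)).set r (List.replicate (kk + 1) 1)) := by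
    refine ⟨by simp, fun l hl => ?_, fun l h1 h2 => ?_⟩
    · rw [getD_set_ne _ _ _ _ _ (by omega)]
      exact getD_replicate _ _ _ _ (by omega)
    · by_cases he : l = r
      · subst he
        rw [getD_set_self _ _ _ _ (by simp)]
        exact ⟨by simp, fun p hp => by rw [getD_replicate _ _ _ _ hp, g_diag]⟩
      · have hl1 : l = r + 1 := by omega
        subst hl1
        rw [getD_set_ne _ _ _ _ _ (by omega), getD_replicate _ _ _ _ (by omega)]
        exact ⟨by simp, fun p hp => by
          rw [getD_replicate _ _ _ _ hp, g_empty cs (by omega)]⟩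
  have h0 := foldA_inv cs kk r dpp hdpp hr r (Nat.le_refl r) _ hinit
  exact fun l hl => h0.2.2 l (Nat.zero_le l) hl

lemma outerA (cs : List Char) (kk : Nat) (dpp0 : List (List Int))
    (h0 : AprevInv cs kk 0 dpp0) :
    ∀ m, AprevInv cs kk m ((List.range' 1 m).foldl (solveAcol cs kk) dpp0) := by
  intro m
  induction m with
  | zero => simpa using h0
  | succ m ih =>
    have : List.range' 1 (m + 1) = List.range' 1 m ++ [1 + m] := by
      simpa using List.range'_concat (step := 1) (s := 1) (n := m)
    rw [this, List.foldl_append]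
    simp only [List.foldl_cons, List.foldl_nil]
    have := colA_inv cs kk (1 + m) _ (by simpa [Nat.add_sub_cancel_left] using ih) (by omega)
    simpa [Nat.add_comm 1 m] using this

-- ===== B-side invariants =====

-- every memo entry with nonnegative budget holds the recurrence's value
def GoodMemo (cs : List Char) (memo : PySem.Dict (Nat × Nat × Int) Int) : Prop :=
  ∀ (l r : Nat) (p : Int) (v : Int), memo.get? (l, r, p) = some v → 0 ≤ p →
    v = g cs l r p.toNat

lemma goodMemo_insert (cs : List Char) (memo : PySem.Dict (Nat × Nat × Int) Int)
    (l r : Nat) (p : Int) (v : Int) (hm : GoodMemo cs memo)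
    (hv : 0 ≤ p → v = g cs l r p.toNat) :
    GoodMemo cs (memo.insert (l, r, p) v) := by
  intro l' r' p' v' hget hp'
  rw [PySem.Dict.get?_insert] at hget
  by_cases he : ((l', r', p') : Nat × Nat × Int) = (l, r, p)
  · rw [if_pos he] at hget
    obtain ⟨rfl, rfl, rfl⟩ := Prod.mk.injEq .. ▸ (by
      exact ⟨congrArg Prod.fst he, congrArg (fun q => q.2.1) he, congrArg (fun q => q.2.2) he⟩ :
      l' = l ∧ r' = r ∧ p' = p)
    cases hget
    exact hv hp'
  · rw [if_neg he] at hget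
    exact hm l' r' p' v' hget hp'

lemma solveBf_correct (cs : List Char) :
    ∀ (d l r : Nat) (p : Int) (memo : PySem.Dict (Nat × Nat × Int) Int),
      r - l ≤ d → 0 ≤ p → GoodMemo cs memo →
      (solveBf cs l r p memo).1 = g cs l r p.toNat ∧ GoodMemo cs (solveBf cs l r p memo).2 := by
  intro d
  induction d with
  | zero =>
    intro l r p memo hd hp hm
    rw [solveBf]
    by_cases h1 : r < l
    · simp only [dif_pos h1]
      exact ⟨(g_empty cs h1 p.toNat).symm, hm⟩
    · have h2 : l = r := by omega
      simp only [dif_neg h1, dif_pos h2]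
      exact ⟨by rw [h2, g_diag], hm⟩
  | succ d ih =>
    intro l r p memo hd hp hm
    rw [solveBf]
    by_cases h1 : r < l
    · simp only [dif_pos h1]
      exact ⟨(g_empty cs h1 p.toNat).symm, hm⟩
    · by_cases h2 : l = r
      · simp only [dif_neg h1, dif_pos h2]
        exact ⟨by rw [h2, g_diag], hm⟩
      · simp only [dif_neg h1, dif_neg h2]
        have hlr : l < r := by omega
        cases hget : memo.get? (l, r, p) with
        | some v => exact ⟨hm l r p v hget hp, hm⟩
        | none =>
          simp only
          by_cases hc : cs.getD l ' ' = cs.getD r ' '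
          · simp only [if_pos hc]
            obtain ⟨hv0, hm0⟩ := ih (l + 1) (r - 1) p memo (by omega) hp hm
            refine ⟨?_, goodMemo_insert cs _ _ _ _ _ hm0 (fun _ => ?_)⟩
            · simp only [hv0, g_step cs hlr p.toNat, if_pos hc]
            · simp only [hv0, g_step cs hlr p.toNat, if_pos hc]
          · simp only [if_neg hc]
            obtain ⟨hv1, hm1⟩ := ih l (r - 1) p memo (by omega) hp hm
            obtain ⟨hv2, hm2⟩ := ih (l + 1) r p _ (by omega) hp hm1
            by_cases hp0 : p ≠ 0
            · simp only [if_pos hp0]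
              have hp1 : (0 : Int) ≤ p - 1 := by omega
              obtain ⟨hv3, hm3⟩ := ih (l + 1) (r - 1) (p - 1) _ (by omega) hp1 hm2
              have hpt : (p - 1).toNat = p.toNat - 1 := by omega
              have hptn : p.toNat ≠ 0 := by omega
              refine ⟨?_, goodMemo_insert cs _ _ _ _ _ hm3 (fun _ => ?_)⟩ <;>
                simp only [hv1, hv2, hv3, hpt, g_step cs hlr p.toNat, if_neg hc, if_neg hptn]
            · simp only [if_neg hp0]
              push Not at hp0
              have hptn : p.toNat = 0 := by omega
              refine ⟨?_, goodMemo_insert cs _ _ _ _ _ hm2 (fun _ => ?_)⟩ <;>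
                simp only [hv1, hv2, hptn, g_step cs hlr 0, if_neg hc, if_true]

lemma goodMemo_empty (cs : List Char) : GoodMemo cs PySem.Dict.empty := by
  intro l r p v hget _
  rw [PySem.Dict.get?_empty] at hget
  cases hget

-- ===== VERDICT (by name: the statement is the Claim_ definition above) =====
theorem solve_spec : Claim_equal_solve := by
  intro s k _hdom hpre
  unfold Pre_solve at hpre
  unfold Spec_solve
  simp only [solve, solve_alt]
  by_cases hg : PySem.Int.floordiv ((s.toList.length : Int)) 2 ≤ k
  · rw [if_pos hg, if_pos hg]
  · simp only [if_neg hg]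
    have hediv : PySem.Int.floordiv ((s.toList.length : Int)) 2 = (s.toList.length : Int) / 2 :=
      PySem.Int.floordiv_eq_ediv_of_pos (by norm_num)
    have h2 : 2 ≤ s.toList.length := by
      rw [hediv] at hg
      by_contra hlt
      interval_cases h : s.toList.length <;> simp_all
    have h0 : AprevInv s.toList k.toNat 0
        [List.replicate (k.toNat + 1) 1, List.replicate (k.toNat + 1) 0] := by
      intro l hl
      by_cases hl0 : l = 0
      · subst hl0
        simp only [List.getD_cons_zero]
        exact ⟨by simp, fun p hp => by rw [getD_replicate _ _ _ _ hp, g_diag]⟩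
      · have hl1 : l = 1 := by omega
        subst hl1
        simp only [List.getD_cons_succ, List.getD_cons_zero]
        exact ⟨by simp, fun p hp => by
          rw [getD_replicate _ _ _ _ hp, g_empty s.toList (by omega)]⟩
    have hArow := outerA s.toList k.toNat _ h0 (s.toList.length - 1) 0 (Nat.zero_le _)
    have hB := solveBf_correct s.toList (s.toList.length - 1) 0 (s.toList.length - 1) k
      PySem.Dict.empty (by omega) hpre (goodMemo_empty s.toList)
    rw [hArow.2 k.toNat (by omega), hB.1]
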